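-- pv_equiv track=rewrite | github.com/MrBrantCode/unitest_baseline | mut_generate/mist_train_taco/taco_8434/solution.py | max_potions_drunk
-- ===== SOURCE A (Python) =====
-- def max_potions_drunk(n: int, a: list) -> int:
--     """
--     Calculate the maximum number of potions that can be drunk without the health becoming negative.
--
--     Parameters:
--     n (int): The number of potions.
--     a (list): A list of integers representing the change in health after drinking each potion.
--
--     Returns:
--     int: The maximum number of potions that can be drunk.
--     """
--     pois = 0
--     health = 0
--     neg_pos = []
--
--     for potion in a:
--         if potion >= 0:
--             pois += 1
--             health += potion
--         elif potion + health >= 0: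
--             pois += 1
--             health += potion
--             neg_pos.append(potion)
--         elif neg_pos:
--             mn = min(neg_pos)
--             if potion > mn:
--                 health = health - mn + potion
--                 neg_pos.remove(mn)
--                 neg_pos.append(potion)
--
--     return pois
-- ===== SOURCE B (Python) =====
-- def _insert_sorted(xs, p):
--     """Return a new ascending list: p placed before the first element >= p."""
--     for i, x in enumerate(xs):
--         if x >= p:
--             return xs[:i] + [p] + xs[i:]
--     return xs + [p]
--
--
-- def max_potions_drunk(n: int, a: list) -> int:
--     count = 0
--     health = 0
--     taken = []  # negative potions drunk so far, kept in ascending order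
--     for p in a:
--         if p >= 0:
--             count += 1
--             health += p
--         elif health + p >= 0:
--             count += 1
--             health += p
--             taken = _insert_sorted(taken, p)
--         elif taken and p > taken[0]:
--             health += p - taken[0]
--             taken = _insert_sorted(taken[1:], p)
--     return count
-- ===== Notes on version B (the rewrite author's own statement) =====
-- stated objective: alternative
-- what changed: B keeps the drunk negative potions in an ascending sorted list (the minimum is the head, removal is dropping the head, insertion keeps order), replacing A's unsorted list that is rescanned with min() and remove() on every conflict.
import Mathlib
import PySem

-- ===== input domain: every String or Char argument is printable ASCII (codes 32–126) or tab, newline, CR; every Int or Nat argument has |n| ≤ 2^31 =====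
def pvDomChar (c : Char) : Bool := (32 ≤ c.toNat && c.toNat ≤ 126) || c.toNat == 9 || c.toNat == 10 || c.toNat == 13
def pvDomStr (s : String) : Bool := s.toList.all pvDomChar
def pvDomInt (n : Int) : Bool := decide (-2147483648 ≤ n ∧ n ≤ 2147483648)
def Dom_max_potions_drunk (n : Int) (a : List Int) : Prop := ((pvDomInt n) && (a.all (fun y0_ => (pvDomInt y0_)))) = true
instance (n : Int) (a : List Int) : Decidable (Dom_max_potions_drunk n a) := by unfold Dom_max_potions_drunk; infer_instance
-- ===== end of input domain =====

-- B keeps the taken negative potions as an ascending sorted list (head = min, linear insert)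
-- instead of A's unsorted list scanned with min()/remove() on each conflict: alternative data structure.


-- ===== PORT A =====
-- A's loop state: (pois, health, neg_pos); min()/remove() ported via PySem.List.min?/remove?
def maxPotionsLoopA : List Int → Int → Int → List Int → Int
  | [], pois, _health, _np => pois
  | p :: rest, pois, health, np =>
    if p ≥ 0 then
      maxPotionsLoopA rest (pois + 1) (health + p) np
    else if p + health ≥ 0 then
      maxPotionsLoopA rest (pois + 1) (health + p) (np ++ [p])
    else if np ≠ [] then
      match PySem.List.min? np (fun x => x) with
      | none => maxPotionsLoopA rest pois health np   -- unreachable: np ≠ []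
      | some mn =>
        if p > mn then
          maxPotionsLoopA rest pois (health - mn + p)
            (((PySem.List.remove? np mn).getD np) ++ [p])  -- remove? is some: mn ∈ np
        else maxPotionsLoopA rest pois health np
    else maxPotionsLoopA rest pois health np

def max_potions_drunk (n : Int) (a : List Int) : Int :=
  maxPotionsLoopA a 0 0 []

-- ===== PORT B =====
-- B's helper: insert p into an ascending list, before the first element ≥ p
def insertAsc (p : Int) : List Int → List Int
  | [] => [p]
  | x :: xs => if x ≥ p then p :: x :: xs else x :: insertAsc p xs

-- B's loop state: (count, health, taken) with taken ascending (head = minimum)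
def maxPotionsLoopB : List Int → Int → Int → List Int → Int
  | [], cnt, _health, _tk => cnt
  | p :: rest, cnt, health, tk =>
    if p ≥ 0 then
      maxPotionsLoopB rest (cnt + 1) (health + p) tk
    else if health + p ≥ 0 then
      maxPotionsLoopB rest (cnt + 1) (health + p) (insertAsc p tk)
    else
      match tk with
      | [] => maxPotionsLoopB rest cnt health tk
      | m :: t =>
        if p > m then maxPotionsLoopB rest cnt (health + (p - m)) (insertAsc p t)
        else maxPotionsLoopB rest cnt health tk

def max_potions_drunk_alt (n : Int) (a : List Int) : Int :=
  maxPotionsLoopB a 0 0 []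

-- ===== PRECONDITION & SPEC =====
def Spec_max_potions_drunk (n : Int) (a : List Int) (out : Int) : Prop := out = max_potions_drunk_alt n a
instance (n : Int) (a : List Int) (out : Int) : Decidable (Spec_max_potions_drunk n a out) := by unfold Spec_max_potions_drunk; infer_instance

-- ===== CLAIM (what is proved, stated in full; the proofs are below) =====
def Claim_equal_max_potions_drunk : Prop := ∀ (n : Int) (a : List Int), Dom_max_potions_drunk n a → Spec_max_potions_drunk n a (max_potions_drunk n a)

-- ===== LEMMAS AND PROOFS =====

theorem insertAsc_perm (p : Int) (xs : List Int) : (insertAsc p xs).Perm (p :: xs) := by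
  induction xs with
  | nil => simp [insertAsc]
  | cons x xs ih =>
      simp only [insertAsc]
      split
      · exact List.Perm.refl _
      · exact (ih.cons x).trans (List.Perm.swap p x xs)

theorem insertAsc_pairwise (p : Int) (xs : List Int) (h : xs.Pairwise (· ≤ ·)) :
    (insertAsc p xs).Pairwise (· ≤ ·) := by
  induction xs with
  | nil => simp [insertAsc]
  | cons x xs ih =>
      rw [List.pairwise_cons] at h
      simp only [insertAsc]
      split
      · rename_i hxp
        refine List.pairwise_cons.2 ⟨?_, List.pairwise_cons.2 ⟨h.1, h.2⟩⟩
        intro y hy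
        rcases List.mem_cons.1 hy with rfl | hy
        · omega
        · exact le_trans (by omega) (h.1 y hy)
      · rename_i hxp
        refine List.pairwise_cons.2 ⟨?_, ih h.2⟩
        intro y hy
        have := (insertAsc_perm p xs).mem_iff.1 hy
        rcases List.mem_cons.1 this with rfl | hy'
        · omega
        · exact h.1 y hy'

-- the key invariant: if tk is a sorted rearrangement of np, the two loops agree
theorem loop_eq (a : List Int) : ∀ (pois health : Int) (np tk : List Int),
    tk.Perm np → tk.Pairwise (· ≤ ·) →
    maxPotionsLoopA a pois health np = maxPotionsLoopB a pois health tk := by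
  induction a with
  | nil => intro pois health np tk _ _; rfl
  | cons p rest ih =>
    intro pois health np tk hperm hsort
    simp only [maxPotionsLoopA, maxPotionsLoopB]
    by_cases h0 : p ≥ 0
    · simp only [if_pos h0]; exact ih _ _ np tk hperm hsort
    · simp only [if_neg h0]
      by_cases h1 : p + health ≥ 0
      · have h1' : health + p ≥ 0 := by omega
        simp only [if_pos h1, if_pos h1']
        exact ih _ _ _ _ ((insertAsc_perm p tk).trans ((hperm.cons p).trans
          (List.perm_append_singleton p np).symm)) (insertAsc_pairwise p tk hsort)
      · have h1' : ¬ health + p ≥ 0 := by omega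
        simp only [if_neg h1, if_neg h1']
        cases tk with
        | nil =>
          have hnp : np = [] := hperm.symm.eq_nil
          subst hnp
          simp only [ne_eq, not_true_eq_false, if_false]
          exact ih _ _ [] [] (List.Perm.refl _) (by simp)
        | cons m t =>
          have hnpne : np ≠ [] := by
            intro h; subst h; exact absurd hperm.eq_nil (by simp)
          simp only [if_pos hnpne]
          -- min of np equals m, the head of the sorted tk
          obtain ⟨mn, hmn⟩ : ∃ mn, PySem.List.min? np (fun x => x) = some mn := by
            cases hmin : PySem.List.min? np (fun x => x) with
            | none => exact absurd ((PySem.List.min?_eq_none_iff np (fun x => x)).1 hmin) hnpne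
            | some v => exact ⟨v, rfl⟩
          have hmem : mn ∈ np := PySem.List.min?_mem hmn
          have hislow : ∀ y ∈ np, mn ≤ y := by
            intro y hy; exact PySem.List.min?_isMin hmn y hy
          have hm_np : m ∈ np := hperm.subset (List.mem_cons_self)
          have hmn_tk : mn ∈ m :: t := hperm.symm.subset hmem
          have hle1 : mn ≤ m := hislow m hm_np
          have hle2 : m ≤ mn := by
            rcases List.mem_cons.1 hmn_tk with rfl | hmt
            · exact le_refl _
            · exact (List.pairwise_cons.1 hsort).1 mn hmt
          have heq : mn = m := le_antisymm hle1 hle2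
          subst heq
          rw [hmn]
          by_cases hgt : p > mn
          · simp only [if_pos hgt]
            rw [PySem.List.remove?_eq_some_erase np mn hmem]
            have h1 : (np.erase mn).Perm t := by
              have h2 := hperm.symm.erase mn
              simpa using h2
            have hperm' : (insertAsc p t).Perm ((np.erase mn) ++ [p]) :=
              (insertAsc_perm p t).trans ((h1.symm.cons p).trans
                (List.perm_append_singleton p (np.erase mn)).symm)
            have hsort' : (insertAsc p t).Pairwise (· ≤ ·) :=
              insertAsc_pairwise p t (List.pairwise_cons.1 hsort).2
            have hh : health - mn + p = health + (p - mn) := by ring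
            rw [Option.getD_some, hh]
            exact ih _ _ _ _ hperm' hsort'
          · simp only [if_neg hgt]
            exact ih _ _ np (mn :: t) hperm hsort

-- ===== VERDICT (by name: the statement is the Claim_ definition above) =====
theorem max_potions_drunk_spec : Claim_equal_max_potions_drunk := by
  intro n a _
  unfold Spec_max_potions_drunk max_potions_drunk max_potions_drunk_alt
  exact loop_eq a 0 0 [] [] (List.Perm.refl _) (by simp)
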